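-- pv_equiv track=rewrite | github.com/tribasuki74/Indonesian-Address-Parser | Indonesian_Address_Parser/Perser.py | getProvinsi
-- ===== SOURCE A (Python) =====
-- def getProvinsi(_list):
--     pr = []
--     for i in _list:
--         exist = False
--         for idx, p in enumerate(pr):
--             if i[0] == p[0]:
--                 exist = True
--                 if i[1] > p[1]:
--                     p[1] = i[1]
--                 p[2] = p[2] + 1
--
--         if not exist:
--             pr.append([i[0], i[1], 1])
--     return pr
-- ===== SOURCE B (Python) =====
-- def getProvinsi(_list):
--     # Phase 1: distinct keys in order of first appearance.
--     keys = []
--     for i in _list: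
--         if i[0] not in keys:
--             keys.append(i[0])
--     # Phase 2: one scan of the input per key.
--     result = []
--     for key in keys:
--         vals = [i[1] for i in _list if i[0] == key]
--         result.append([key, max(vals), len(vals)])
--     return result
-- ===== Notes on version B (the rewrite author's own statement) =====
-- stated objective: alternative
-- what changed: Replaces A's single pass that mutates an accumulated group list in place (inner enumerate-scan of the groups per item) by a two-phase computation: first collect the distinct keys in first-seen order, then for each key scan the whole input and emit [key, max(vals), len(vals)].
import Mathlib
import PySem

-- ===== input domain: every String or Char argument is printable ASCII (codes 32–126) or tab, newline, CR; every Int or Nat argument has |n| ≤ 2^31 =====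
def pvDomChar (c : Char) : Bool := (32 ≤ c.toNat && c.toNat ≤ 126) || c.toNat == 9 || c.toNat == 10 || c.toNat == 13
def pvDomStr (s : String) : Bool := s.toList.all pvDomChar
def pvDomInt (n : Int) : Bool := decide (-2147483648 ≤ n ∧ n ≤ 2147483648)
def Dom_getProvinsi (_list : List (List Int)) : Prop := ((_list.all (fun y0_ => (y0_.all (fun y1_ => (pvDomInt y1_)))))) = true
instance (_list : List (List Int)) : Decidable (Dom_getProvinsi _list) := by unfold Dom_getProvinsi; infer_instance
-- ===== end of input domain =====

-- ===== PORT A =====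
-- Header: B is an alternative two-phase decomposition (keys first, then per-key scan)
-- of A's single mutating pass; same exact values, objective: alternative.

-- inner `for idx, p in enumerate(pr)` loop of A: returns (exist, updated pr).
-- pr rows are always 3-element lists [key, max, count]; the wildcard branch is unreachable.
def pvInnerA (i0 i1 : Int) : List (List Int) → Bool × List (List Int)
  | [] => (false, [])
  | p :: rest =>
    let (e, rest') := pvInnerA i0 i1 rest
    match p with
    | pk :: pm :: pc :: t =>
      if i0 = pk then
        (true, (pk :: (if i1 > pm then i1 else pm) :: (pc + 1) :: t) :: rest')
      else (e, p :: rest')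
    | _ => (e, p :: rest')

def getProvinsi (_list : List (List Int)) : List (List Int) :=
  _list.foldl (fun pr i =>
    match PySem.List.pyGet? i 0, PySem.List.pyGet? i 1 with
    | some i0, some i1 =>
      let (exist, pr') := pvInnerA i0 i1 pr
      if exist then pr' else pr' ++ [[i0, i1, 1]]
    | _, _ => pr  -- IndexError: outside Pre_
    ) []

-- ===== PORT B =====
-- phase 1 of Source B: distinct keys in first-seen order
def pvKeysB (_list : List (List Int)) : List Int :=
  _list.foldl (fun ks i =>
    match PySem.List.pyGet? i 0 with
    | some k => if k ∈ ks then ks else ks ++ [k]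
    | none => ks  -- IndexError: outside Pre_
    ) []

-- `[i[1] for i in _list if i[0] == key]`
def pvValsB (_list : List (List Int)) (k : Int) : List Int :=
  _list.filterMap (fun i =>
    match PySem.List.pyGet? i 0 with
    | some i0 => if i0 = k then PySem.List.pyGet? i 1 else none
    | none => none)

def getProvinsi_alt (_list : List (List Int)) : List (List Int) :=
  (pvKeysB _list).map (fun k =>
    let vals := pvValsB _list k
    -- max(vals): vals is nonempty for every collected key, so the default is unreachable
    [k, (PySem.List.max? vals (fun y => y)).getD 0, (vals.length : Int)])

-- ===== PRECONDITION & SPEC =====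
-- Pre_: exactly the inputs where A returns (A indexes i[0] and i[1] of every item;
-- shorter items raise IndexError).
def Pre_getProvinsi (_list : List (List Int)) : Prop :=
  ∀ i ∈ _list, 2 ≤ i.length
instance (_list : List (List Int)) : Decidable (Pre_getProvinsi _list) := by
  unfold Pre_getProvinsi; infer_instance
def pvWitness_getProvinsi : List (List Int) := [[1, 5], [2, 3], [1, 7]]
def Spec_getProvinsi (_list : List (List Int)) (out : List (List Int)) : Prop := out = getProvinsi_alt _list
instance (_list : List (List Int)) (out : List (List Int)) : Decidable (Spec_getProvinsi _list out) := by unfold Spec_getProvinsi; infer_instance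

-- ===== CLAIM (what is proved, stated in full; the proofs are below) =====
def Claim_equal_getProvinsi : Prop := ∀ (_list : List (List Int)), Dom_getProvinsi _list → Pre_getProvinsi _list → Spec_getProvinsi _list (getProvinsi _list)

-- ===== LEMMAS AND PROOFS =====

-- the row B emits for key k
def pvRow (xs : List (List Int)) (k : Int) : List Int :=
  [k, (PySem.List.max? (pvValsB xs k) (fun y => y)).getD 0, ((pvValsB xs k).length : Int)]

theorem pvKeysB_append (xs : List (List Int)) (i0 i1 : Int) (t : List Int) :
    pvKeysB (xs ++ [i0 :: i1 :: t]) =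
      (if i0 ∈ pvKeysB xs then pvKeysB xs else pvKeysB xs ++ [i0]) := by
  simp [pvKeysB, List.foldl_append]

theorem pvValsB_append (xs : List (List Int)) (i0 i1 : Int) (t : List Int) (k : Int) :
    pvValsB (xs ++ [i0 :: i1 :: t]) k =
      pvValsB xs k ++ (if i0 = k then [i1] else []) := by
  simp only [pvValsB, List.filterMap_append]
  congr 1
  by_cases h : i0 = k <;> simp [h]

theorem pvRow_of_ne (xs : List (List Int)) (i0 i1 : Int) (t : List Int) (k : Int)
    (h : i0 ≠ k) : pvRow (xs ++ [i0 :: i1 :: t]) k = pvRow xs k := by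
  rw [pvRow, pvValsB_append, if_neg h, List.append_nil]; rfl

theorem max_append_one (vs : List Int) (m v : Int)
    (h : PySem.List.max? vs (fun y => y) = some m) :
    PySem.List.max? (vs ++ [v]) (fun y => y) = some (if v > m then v else m) := by
  cases vs with
  | nil => simp [PySem.List.max?] at h
  | cons x t =>
    rw [PySem.List.max?_id_cons] at h
    have hm : t.foldl max x = m := by simpa using h
    have hc : ((x :: t) ++ [v]) = x :: (t ++ [v]) := rfl
    rw [hc, PySem.List.max?_id_cons]
    simp only [List.foldl_append, List.foldl_cons, List.foldl_nil, hm]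
    congr 1
    rcases lt_or_ge m v with hlt | hge
    · simp [max_eq_right hlt.le, if_pos hlt]
    · simp [max_eq_left hge, if_neg (not_lt.mpr hge)]

theorem pvInnerA_map (keys : List Int) (xs : List (List Int)) (i0 i1 : Int) :
    pvInnerA i0 i1 (keys.map (pvRow xs)) =
      (decide (i0 ∈ keys),
       keys.map (fun k => if i0 = k then
         (k :: (if i1 > (PySem.List.max? (pvValsB xs k) (fun y => y)).getD 0
                then i1 else (PySem.List.max? (pvValsB xs k) (fun y => y)).getD 0)
            :: (((pvValsB xs k).length : Int) + 1) :: [])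
         else pvRow xs k)) := by
  induction keys with
  | nil => simp [pvInnerA]
  | cons k ks ih =>
    simp only [List.map_cons, pvInnerA, ih]
    by_cases h : i0 = k
    · subst h; simp [pvRow]
    · simp [pvRow, h]

-- invariant: A's accumulated groups = B's rows over B's keys, and every key has a value
theorem pvMain (xs : List (List Int)) (hpre : ∀ i ∈ xs, 2 ≤ i.length) :
    getProvinsi xs = (pvKeysB xs).map (pvRow xs) ∧
      (∀ k, k ∈ pvKeysB xs ↔ pvValsB xs k ≠ []) := by
  induction xs using List.reverseRecOn with
  | nil => simp [getProvinsi, pvKeysB, pvValsB]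
  | append_singleton xs x ih =>
    obtain ⟨hA, hK⟩ := ih (fun i hi => hpre i (by simp [hi]))
    have hx : 2 ≤ x.length := hpre x (by simp)
    obtain ⟨i0, i1, t, rfl⟩ : ∃ a b t, x = a :: b :: t := by
      match x, hx with
      | a :: b :: t, _ => exact ⟨a, b, t, rfl⟩
    have hstep : getProvinsi (xs ++ [i0 :: i1 :: t]) =
        (if (pvInnerA i0 i1 (getProvinsi xs)).1 then (pvInnerA i0 i1 (getProvinsi xs)).2
         else (pvInnerA i0 i1 (getProvinsi xs)).2 ++ [[i0, i1, 1]]) := by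
      simp [getProvinsi, List.foldl_append]
    by_cases hmem : i0 ∈ pvKeysB xs
    · -- key already present: keys unchanged, matching row updated
      have hvne : pvValsB xs i0 ≠ [] := (hK i0).mp hmem
      obtain ⟨m, hm⟩ : ∃ m, PySem.List.max? (pvValsB xs i0) (fun y => y) = some m := by
        cases hv : pvValsB xs i0 with
        | nil => exact absurd hv hvne
        | cons a u => exact ⟨u.foldl max a, PySem.List.max?_id_cons a u⟩
      constructor
      · rw [hstep, hA, pvInnerA_map, pvKeysB_append, if_pos hmem]
        simp only [decide_eq_true_eq, hmem, if_true]
        apply List.map_congr_left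
        intro k hk
        by_cases hki : i0 = k
        · subst hki
          rw [if_pos rfl, pvRow, pvValsB_append, if_pos rfl,
            max_append_one _ m _ hm, hm]
          simp only [Option.getD_some, List.length_append, List.length_cons,
            List.length_nil]
          have : ((pvValsB xs i0).length + 1 : Int) = ((pvValsB xs i0).length + (0 + 1) : Nat) := by
            push_cast; ring
          rw [this]
        · rw [if_neg hki, pvRow_of_ne _ _ _ _ _ hki]
      · intro k
        rw [pvKeysB_append, if_pos hmem, pvValsB_append]
        by_cases hki : i0 = k
        · subst hki; simp [hmem]
        · simp [hki, hK k]
    · -- new key: appended at the end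
      have hvnil : pvValsB xs i0 = [] := by
        by_contra hne
        exact hmem ((hK i0).mpr hne)
      constructor
      · rw [hstep, hA, pvInnerA_map, pvKeysB_append, if_neg hmem]
        simp only [decide_eq_true_eq, hmem, if_false, List.map_append, List.map_cons,
          List.map_nil]
        congr 1
        · apply List.map_congr_left
          intro k hk
          have hki : i0 ≠ k := fun h => hmem (h ▸ hk)
          rw [if_neg hki, pvRow_of_ne _ _ _ _ _ hki]
        · rw [pvRow, pvValsB_append, if_pos rfl, hvnil]
          simp [PySem.List.max?_id_cons]
      · intro k
        rw [pvKeysB_append, if_neg hmem, pvValsB_append]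
        by_cases hki : i0 = k
        · subst hki; simp
        · simp only [List.mem_append, List.mem_cons, List.not_mem_nil, or_false,
            if_neg hki, List.append_nil, hK k]
          constructor
          · rintro (hne | hke)
            · exact hne
            · exact absurd hke.symm hki
          · exact fun hne => Or.inl hne

-- ===== VERDICT (by name: the statement is the Claim_ definition above) =====
theorem getProvinsi_spec : Claim_equal_getProvinsi := by
  intro xs _ hpre
  unfold Spec_getProvinsi getProvinsi_alt
  exact (pvMain xs hpre).1
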